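-- pv_equiv track=rewrite | github.com/NatanFA/ProgramasPython | PS101.py | trocamatriz4
-- ===== SOURCE A (Python) =====
-- def trocamatriz4(matriz1, matriz2, i, j):
--     if (j<0):
--         return matriz1, matriz2
--     if matriz2[i][j] != "X" and matriz2[i][j] != ".":
--         if matriz2[i][j] == "#":
--             return matriz1, matriz2
--         else:
--             matriz1[i][j] = "X"
--     return trocamatriz4(matriz1, matriz2, i, j-1)
-- ===== SOURCE B (Python) =====
-- def trocamatriz4(matriz1, matriz2, i, j):
--     if j < 0:
--         return matriz1, matriz2
--     row2 = matriz2[i]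
--     prefix = row2[:j + 1]
--     try:
--         stop = j - prefix[::-1].index("#")
--     except ValueError:
--         stop = -1
--     for p in range(stop + 1, j + 1):
--         if row2[p] != "X" and row2[p] != ".":
--             matriz1[i][p] = "X"
--     return matriz1, matriz2
-- ===== Notes on version B (the rewrite author's own statement) =====
-- stated objective: alternative
-- what changed: Replaces the cell-by-cell tail recursion with a non-recursive plan: locate the highest '#' at or below column j with a reversed-slice index search, then mark the markable cells above it in one ascending range pass.
import Mathlib
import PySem

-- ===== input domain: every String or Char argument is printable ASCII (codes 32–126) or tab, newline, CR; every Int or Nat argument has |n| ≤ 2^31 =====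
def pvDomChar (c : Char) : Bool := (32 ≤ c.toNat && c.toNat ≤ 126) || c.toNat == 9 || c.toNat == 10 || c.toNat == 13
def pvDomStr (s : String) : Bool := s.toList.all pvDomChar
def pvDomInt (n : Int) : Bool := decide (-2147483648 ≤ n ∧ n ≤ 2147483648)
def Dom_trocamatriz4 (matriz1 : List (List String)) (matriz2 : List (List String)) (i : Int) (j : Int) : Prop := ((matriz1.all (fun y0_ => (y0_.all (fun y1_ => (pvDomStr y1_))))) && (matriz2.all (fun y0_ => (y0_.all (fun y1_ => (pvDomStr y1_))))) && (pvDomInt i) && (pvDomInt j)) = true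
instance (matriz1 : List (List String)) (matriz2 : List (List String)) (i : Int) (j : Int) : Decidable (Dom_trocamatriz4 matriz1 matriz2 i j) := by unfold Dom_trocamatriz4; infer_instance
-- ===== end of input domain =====

-- B re-plans A's cell-by-cell tail recursion as: find the highest '#' at or below column j
-- with a reversed-slice index search, then mark the markable cells above it in one range pass
-- (objective: alternative decomposition, same cost). Return-value equivalence only: the Python
-- versions mutate matriz1 in place identically.

-- matriz1[i][j] = "X"  (Python in-place assignment; exact on Pre_, where i is in range)
def pvSetX (m : List (List String)) (i j : Int) : List (List String) :=
  PySem.List.pySetD m i (PySem.List.pySetD (PySem.List.pyGetD m i []) j "X")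

-- ===== PORT A =====
-- pyGet? … getD "": the IndexError inputs are excluded by Pre_trocamatriz4
def trocamatriz4 (matriz1 : List (List String)) (matriz2 : List (List String)) (i : Int) (j : Int) : List (List String) × List (List String) :=
  if j < 0 then (matriz1, matriz2)
  else
    let c := (PySem.List.pyGet? (PySem.List.pyGetD matriz2 i []) j).getD ""
    if c ≠ "X" ∧ c ≠ "." then
      if c = "#" then (matriz1, matriz2)
      else trocamatriz4 (pvSetX matriz1 i j) matriz2 i (j - 1)
    else trocamatriz4 matriz1 matriz2 i (j - 1)
termination_by (j + 1).toNat
decreasing_by all_goals omega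

-- ===== PORT B =====
-- row2[p] != "X" and row2[p] != "."
def pvCond (row2 : List String) (p : Int) : Bool :=
  !((PySem.List.pyGet? row2 p).getD "" == "X") && !((PySem.List.pyGet? row2 p).getD "" == ".")

-- stop = j - row2[:j+1][::-1].index("#")  (ValueError → -1)
def pvStop (row2 : List String) (j : Int) : Int :=
  match PySem.List.index? (PySem.List.slice row2 none (some (j + 1))).reverse "#" with
  | some k => j - (k : Int)
  | none => -1

-- for p in range(a, b): if row2[p] != "X" and row2[p] != ".": matriz1[i][p] = "X"
def pvMark (row2 : List String) (i : Int) (a b : Int) (m : List (List String)) : List (List String) :=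
  (PySem.List.pyRange a b 1).foldl (fun m p => if pvCond row2 p then pvSetX m i p else m) m

def trocamatriz4_alt (matriz1 : List (List String)) (matriz2 : List (List String)) (i : Int) (j : Int) : List (List String) × List (List String) :=
  if j < 0 then (matriz1, matriz2)
  else
    let row2 := PySem.List.pyGetD matriz2 i []
    (pvMark row2 i (pvStop row2 j + 1) (j + 1) matriz1, matriz2)

-- ===== PRECONDITION & SPEC =====
-- Pre_ excludes the IndexError inputs (i or j out of range when j ≥ 0). It is slightly narrower
-- than A's exact returning set: when A stops at '#' or marks nothing it never indexes matriz1,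
-- so it can return even with i/j outside matriz1's range; on such inputs both programs return
-- the matrices unchanged (see cites).
def Pre_trocamatriz4 (matriz1 : List (List String)) (matriz2 : List (List String)) (i : Int) (j : Int) : Prop :=
  j < 0 ∨ (PySem.Raise.InRange matriz1.length i ∧ PySem.Raise.InRange matriz2.length i ∧
           j < ((PySem.List.pyGetD matriz1 i []).length : Int) ∧ j < ((PySem.List.pyGetD matriz2 i []).length : Int))
instance (matriz1 : List (List String)) (matriz2 : List (List String)) (i : Int) (j : Int) : Decidable (Pre_trocamatriz4 matriz1 matriz2 i j) := by unfold Pre_trocamatriz4; unfold PySem.Raise.InRange; infer_instance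
def pvWitness_trocamatriz4 : List (List String) × List (List String) × Int × Int := ([["a"]], [["b"]], 0, 0)
def Spec_trocamatriz4 (matriz1 : List (List String)) (matriz2 : List (List String)) (i : Int) (j : Int) (out : List (List String) × List (List String)) : Prop := out = trocamatriz4_alt matriz1 matriz2 i j
instance (matriz1 : List (List String)) (matriz2 : List (List String)) (i : Int) (j : Int) (out : List (List String) × List (List String)) : Decidable (Spec_trocamatriz4 matriz1 matriz2 i j out) := by unfold Spec_trocamatriz4; infer_instance

-- ===== CLAIM (what is proved, stated in full; the proofs are below) =====
def Claim_equal_trocamatriz4 : Prop := ∀ (matriz1 : List (List String)) (matriz2 : List (List String)) (i : Int) (j : Int), Dom_trocamatriz4 matriz1 matriz2 i j → Pre_trocamatriz4 matriz1 matriz2 i j → Spec_trocamatriz4 matriz1 matriz2 i j (trocamatriz4 matriz1 matriz2 i j)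

-- ===== LEMMAS AND PROOFS =====

lemma pvPyIdx?_lt {n : ℕ} {i : Int} {k : ℕ} (h : PySem.List.pyIdx? n i = some k) : k < n := by
  unfold PySem.List.pyIdx? at h
  split_ifs at h <;> simp_all <;> omega

lemma pvSetD_nonneg {α : Type} (row : List α) (j : Int) (v : α) (hj : 0 ≤ j) :
    PySem.List.pySetD row j v = row.set j.toNat v := by
  unfold PySem.List.pySetD PySem.List.pySet? PySem.List.pyIdx?
  rw [if_pos hj]
  by_cases h : j < (row.length : Int)
  · rw [if_pos h]; rfl
  · rw [if_neg h]
    simp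
    exact (List.set_eq_of_length_le (by omega)).symm

lemma pvSetX_some {m : List (List String)} {i : Int} {k : ℕ} (j : Int)
    (hk : PySem.List.pyIdx? m.length i = some k) (hj : 0 ≤ j) :
    pvSetX m i j = m.set k ((m.getD k []).set j.toNat "X") := by
  unfold pvSetX
  rw [pvSetD_nonneg _ _ _ hj]
  unfold PySem.List.pySetD PySem.List.pySet? PySem.List.pyGetD PySem.List.pyGet?
  rw [hk]
  simp [List.getD]

lemma pvSetX_none {m : List (List String)} {i : Int} (j : Int)
    (hk : PySem.List.pyIdx? m.length i = none) : pvSetX m i j = m := by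
  unfold pvSetX PySem.List.pySetD PySem.List.pySet?
  rw [hk]
  rfl

lemma pvSetX_length (m : List (List String)) (i j : Int) : (pvSetX m i j).length = m.length := by
  unfold pvSetX PySem.List.pySetD PySem.List.pySet?
  cases h : PySem.List.pyIdx? m.length i <;> simp

lemma pvSetX_comm (m : List (List String)) (i p j : Int) (hp : 0 ≤ p) (hj : 0 ≤ j)
    (hne : p ≠ j) : pvSetX (pvSetX m i j) i p = pvSetX (pvSetX m i p) i j := by
  cases hk : PySem.List.pyIdx? m.length i with
  | none =>
      simp only [pvSetX_none j hk, pvSetX_none p hk]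
  | some k =>
      have hlt := pvPyIdx?_lt hk
      have hkj : PySem.List.pyIdx? (pvSetX m i j).length i = some k := by
        rw [pvSetX_length]; exact hk
      have hkp : PySem.List.pyIdx? (pvSetX m i p).length i = some k := by
        rw [pvSetX_length]; exact hk
      rw [pvSetX_some p hkj hp, pvSetX_some j hkp hj,
          pvSetX_some j hk hj, pvSetX_some p hk hp]
      have hne' : j.toNat ≠ p.toNat := by omega
      simp [List.getD, hlt, List.set_set]
      rw [List.set_comm _ _ (show p.toNat ≠ j.toNat by omega)]

lemma pvFold_setX_comm (row2 : List String) (i j : Int) (hj : 0 ≤ j) :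
    ∀ (L : List Int) (m : List (List String)), (∀ p ∈ L, 0 ≤ p ∧ p < j) →
    L.foldl (fun m p => if pvCond row2 p then pvSetX m i p else m) (pvSetX m i j)
      = pvSetX (L.foldl (fun m p => if pvCond row2 p then pvSetX m i p else m) m) i j := by
  intro L
  induction L with
  | nil => intro m _; rfl
  | cons p L ih =>
      intro m hmem
      have hp := hmem p (by simp)
      simp only [List.foldl_cons]
      by_cases hc : pvCond row2 p
      · rw [if_pos hc, if_pos hc, pvSetX_comm m i p j hp.1 hj (by omega)]
        exact ih _ (fun q hq => hmem q (by simp [hq]))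
      · rw [if_neg hc, if_neg hc]
        exact ih _ (fun q hq => hmem q (by simp [hq]))

lemma pvMark_empty (row2 : List String) (i a b : Int) (m : List (List String)) (h : b ≤ a) :
    pvMark row2 i a b m = m := by
  unfold pvMark
  rw [PySem.List.pyRange_one_eq_nil h]
  rfl

lemma pvMark_succ (row2 : List String) (i a j : Int) (m : List (List String)) (h : a ≤ j) :
    pvMark row2 i a (j + 1) m
      = if pvCond row2 j then pvSetX (pvMark row2 i a j m) i j else pvMark row2 i a j m := by
  unfold pvMark
  rw [PySem.List.pyRange_one_succ_right h, List.foldl_append]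
  rfl

lemma pvStop_neg (row2 : List String) : pvStop row2 (-1) = -1 := by
  unfold pvStop
  rw [show (-1 : Int) + 1 = 0 from rfl, PySem.List.slice_to row2 le_rfl]
  simp

lemma pvStop_le (row2 : List String) (j : Int) (hj : -1 ≤ j) : pvStop row2 j ≤ j := by
  unfold pvStop
  cases h : PySem.List.index? (PySem.List.slice row2 none (some (j + 1))).reverse "#" with
  | none => simpa using hj
  | some k => simp

lemma pvStop_ge (row2 : List String) (j : Int) (hj : -1 ≤ j) : -1 ≤ pvStop row2 j := by
  rcases eq_or_lt_of_le hj with h | h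
  · rw [← h, pvStop_neg]
  · have hj0 : 0 ≤ j := by omega
    unfold pvStop
    cases h : PySem.List.index? (PySem.List.slice row2 none (some (j + 1))).reverse "#" with
    | none => simp
    | some k =>
        have hk : k < (PySem.List.slice row2 none (some (j + 1))).reverse.length := by
          obtain ⟨hk, _, _⟩ := PySem.List.getElem_of_index?_eq_some h
          exact hk
        rw [List.length_reverse, PySem.List.slice_to row2 (by omega)] at hk
        have : k < (j + 1).toNat := lt_of_lt_of_le hk (by simp)
        simp
        omega

lemma pvPrefix_reverse (row2 : List String) (j : Int) (hj : 0 ≤ j)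
    (hlen : j < (row2.length : Int)) :
    (PySem.List.slice row2 none (some (j + 1))).reverse
      = row2[j.toNat]'(by omega) :: (PySem.List.slice row2 none (some j)).reverse := by
  rw [PySem.List.slice_to row2 (by omega), PySem.List.slice_to row2 hj]
  have : (j + 1).toNat = j.toNat + 1 := by omega
  rw [this, List.take_add_one]
  have hjl : j.toNat < row2.length := by omega
  simp [List.getElem?_eq_getElem hjl]

lemma pvStop_hash (row2 : List String) (j : Int) (hj : 0 ≤ j) (hlen : j < (row2.length : Int))
    (hc : (PySem.List.pyGet? row2 j).getD "" = "#") : pvStop row2 j = j := by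
  have hg : row2[j.toNat]'(by omega) = "#" := by
    rw [PySem.List.pyGet?_eq_some_getElem row2 hj hlen] at hc
    simp at hc
    exact hc
  unfold pvStop
  rw [pvPrefix_reverse row2 j hj hlen, hg, PySem.List.index?_cons_self]
  simp

lemma pvStop_step (row2 : List String) (j : Int) (hj : 0 ≤ j) (hlen : j < (row2.length : Int))
    (hc : (PySem.List.pyGet? row2 j).getD "" ≠ "#") : pvStop row2 j = pvStop row2 (j - 1) := by
  have hg : row2[j.toNat]'(by omega) ≠ "#" := by
    rw [PySem.List.pyGet?_eq_some_getElem row2 hj hlen] at hc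
    simp at hc
    exact hc
  unfold pvStop
  rw [pvPrefix_reverse row2 j hj hlen, PySem.List.index?_cons_of_ne _ hg,
      show j - 1 + 1 = j from by ring]
  cases h : PySem.List.index? (PySem.List.slice row2 none (some j)).reverse "#" with
  | none => simp
  | some k => simp; omega

lemma pvCond_iff (row2 : List String) (p : Int) :
    pvCond row2 p = true ↔ ((PySem.List.pyGet? row2 p).getD "" ≠ "X" ∧ (PySem.List.pyGet? row2 p).getD "" ≠ ".") := by
  unfold pvCond
  simp

lemma pvAlt_mark (m1 m2 : List (List String)) (i j : Int) (hj : -1 ≤ j) :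
    trocamatriz4_alt m1 m2 i j
      = (pvMark (PySem.List.pyGetD m2 i []) i (pvStop (PySem.List.pyGetD m2 i []) j + 1) (j + 1) m1, m2) := by
  rcases eq_or_lt_of_le hj with h | h
  · rw [← h]
    rw [trocamatriz4_alt, if_pos (by norm_num), pvStop_neg]
    rw [pvMark_empty _ _ _ _ _ (by norm_num)]
  · rw [trocamatriz4_alt, if_neg (by omega)]

lemma pvKey (m2 : List (List String)) (i : Int) :
    ∀ (n : ℕ) (m1 : List (List String)) (j : Int), (j + 1).toNat = n →
      j < ((PySem.List.pyGetD m2 i []).length : Int) →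
      trocamatriz4 m1 m2 i j = trocamatriz4_alt m1 m2 i j := by
  intro n
  induction n with
  | zero =>
      intro m1 j hn _
      have hj : j < 0 := by omega
      rw [trocamatriz4, trocamatriz4_alt, if_pos hj, if_pos hj]
  | succ n ih =>
      intro m1 j hn hlen
      have hj : 0 ≤ j := by omega
      have hn' : (j - 1 + 1).toNat = n := by omega
      set row2 := PySem.List.pyGetD m2 i [] with hrow2
      set c := (PySem.List.pyGet? row2 j).getD "" with hc
      have hsle := pvStop_le row2 (j - 1) (by omega)
      have hsge := pvStop_ge row2 (j - 1) (by omega)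
      rw [trocamatriz4, if_neg (by omega)]
      simp only [← hrow2, ← hc]
      by_cases hM : c ≠ "X" ∧ c ≠ "."
      · rw [if_pos hM]
        by_cases hH : c = "#"
        · rw [if_pos hH]
          rw [pvAlt_mark m1 m2 i j (by omega), ← hrow2,
              pvStop_hash row2 j hj hlen (by rw [← hc]; exact hH),
              pvMark_empty _ _ _ _ _ le_rfl]
        · rw [if_neg hH]
          rw [ih (pvSetX m1 i j) (j - 1) hn' (by omega),
              pvAlt_mark _ m2 i (j - 1) (by omega), ← hrow2,
              pvAlt_mark m1 m2 i j (by omega), ← hrow2,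
              pvStop_step row2 j hj hlen (by rw [← hc]; exact hH)]
          have hmm : pvMark row2 i (pvStop row2 (j - 1) + 1) (j - 1 + 1) (pvSetX m1 i j)
              = pvSetX (pvMark row2 i (pvStop row2 (j - 1) + 1) (j - 1 + 1) m1) i j := by
            unfold pvMark
            apply pvFold_setX_comm row2 i j hj
            intro p hp
            rw [PySem.List.mem_pyRange_one] at hp
            omega
          rw [hmm, pvMark_succ row2 i _ j m1 (by omega),
              if_pos ((pvCond_iff row2 j).mpr (by rw [← hc]; exact hM)),
              show j - 1 + 1 = j from by ring]
      · rw [if_neg hM]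
        rw [ih m1 (j - 1) hn' (by omega), pvAlt_mark m1 m2 i (j - 1) (by omega), ← hrow2,
            pvAlt_mark m1 m2 i j (by omega), ← hrow2]
        have hXd : c = "X" ∨ c = "." := by tauto
        have hH : c ≠ "#" := by rcases hXd with h | h <;> rw [h] <;> decide
        rw [pvStop_step row2 j hj hlen (by rw [← hc]; exact hH),
            pvMark_succ row2 i _ j m1 (by omega),
            if_neg (by rw [pvCond_iff]; rw [← hc]; tauto),
            show j - 1 + 1 = j from by ring]

-- ===== VERDICT (by name: the statement is the Claim_ definition above) =====
theorem trocamatriz4_spec : Claim_equal_trocamatriz4 := by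
  intro m1 m2 i j _ hpre
  unfold Spec_trocamatriz4
  rcases hpre with hj | ⟨_, _, _, hlen2⟩
  · rw [trocamatriz4, trocamatriz4_alt, if_pos hj, if_pos hj]
  · exact pvKey m2 i ((j + 1).toNat) m1 j rfl hlen2
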